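-- pv_equiv track=rewrite | github.com/molly-101/Algorithm | Algorithm_Prepare/Programmers/Cross_Bridge.py | solution
-- ===== SOURCE A (Python) =====
-- def solution(stones, k):
--     set_stones = sorted(set(stones))
--     lt, rt = 0, len(set_stones) - 1
--     answer = 0
--
--     while lt <= rt:
--         mid = (lt + rt) // 2
--
--         if can_cross(stones, set_stones[mid], k):
--             lt = mid + 1
--             answer = set_stones[mid]
--         else:
--             rt = mid - 1
--
--     return answer
--
-- def can_cross(stones, num, k):  # return Boolean value ( True or False )
--     # use mid value
--     blank = 0
--     for i in stones:
--         if i < num: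
--             blank += 1
--         else:
--             blank = 0
--
--         if blank == k:
--             return False
--
--     return True
-- ===== SOURCE B (Python) =====
-- def solution(stones, k):
--     n = len(stones)
--     if k > n:
--         return max(stones, default=0)
--     return min(max(stones[i:i+k]) for i in range(n - k + 1))
-- ===== Notes on version B (the rewrite author's own statement) =====
-- stated objective: simpler
-- what changed: A binary-searches over the sorted distinct stone values, re-scanning all stones per probe; B drops the sort and search entirely and returns the minimum over all k-length windows of the window maximum (max of the whole list when k exceeds its length).
-- outside the precondition, e.g. on solution([2, 1], 0): A returns 0, B raises ValueError; on solution([2, 1], -1): A returns 2, B raises ValueError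
import Mathlib
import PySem

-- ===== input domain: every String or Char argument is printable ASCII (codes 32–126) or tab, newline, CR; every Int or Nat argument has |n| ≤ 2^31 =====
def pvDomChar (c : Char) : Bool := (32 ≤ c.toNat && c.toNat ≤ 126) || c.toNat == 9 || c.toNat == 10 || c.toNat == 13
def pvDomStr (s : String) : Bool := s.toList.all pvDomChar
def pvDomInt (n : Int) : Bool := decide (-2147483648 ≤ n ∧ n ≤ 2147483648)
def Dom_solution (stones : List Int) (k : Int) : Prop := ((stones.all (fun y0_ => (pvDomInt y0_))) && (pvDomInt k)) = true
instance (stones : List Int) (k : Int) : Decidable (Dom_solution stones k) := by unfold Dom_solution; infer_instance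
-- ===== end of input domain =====

-- B replaces A's sort + binary search over the distinct values by a direct minimum over the k-windows' maxima.

-- ===== PORT A =====

-- can_cross's loop: `blank` run counter, early return False when blank == k
def canCrossAux (num k : Int) : List Int → Int → Bool
  | [], _ => true
  | i :: rest, blank =>
    let blank' := if i < num then blank + 1 else 0
    if blank' = k then false else canCrossAux num k rest blank'

def can_cross (stones : List Int) (num k : Int) : Bool := canCrossAux num k stones 0

-- midpoint bounds, used for termination of the while loop
theorem pvMidBounds (lt rt : Int) (h : lt ≤ rt) :
    lt ≤ PySem.Int.floordiv (lt + rt) 2 ∧ PySem.Int.floordiv (lt + rt) 2 ≤ rt :=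
  PySem.Int.floordiv_two_mid_bounds h

-- the while loop of `solution`; set_stones[mid] is always in range (0 ≤ lt ≤ mid ≤ rt < len), ported as pyGet?/getD
def bsLoop (ss stones : List Int) (k lt rt answer : Int) : Int :=
  if h : lt ≤ rt then
    let mid := PySem.Int.floordiv (lt + rt) 2
    let v := (PySem.List.pyGet? ss mid).getD 0
    if can_cross stones v k then bsLoop ss stones k (mid + 1) rt v
    else bsLoop ss stones k lt (mid - 1) answer
  else answer
termination_by (rt + 1 - lt).toNat
decreasing_by
  · have := pvMidBounds lt rt h; omega
  · have := pvMidBounds lt rt h; omega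

def solution (stones : List Int) (k : Int) : Int :=
  let set_stones := PySem.List.sorted (PySem.Set.ofList stones) (fun x => x) false
  bsLoop set_stones stones k 0 ((set_stones.length : Int) - 1) 0

-- ===== PORT B =====

-- min over all k-windows of the window max; max(stones, default=0) when k > len(stones).
-- Under Pre_ (1 ≤ k) every max()/min() below is over a nonempty list, so the `.getD 0` defaults are never taken.
def solution_alt (stones : List Int) (k : Int) : Int :=
  let n : Int := stones.length
  if k > n then (PySem.List.max? stones (fun x => x)).getD 0
  else
    (PySem.List.min?
      ((PySem.List.pyRange 0 (n - k + 1) 1).map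
        (fun i => (PySem.List.max? (PySem.List.slice stones (some i) (some (i + k))) (fun x => x)).getD 0))
      (fun x => x)).getD 0

-- ===== PRECONDITION & SPEC =====
-- Pre_ restricts to the problem's natural domain k ≥ 1 (the number of consecutive missing stones that ends a crossing).
-- For k ≤ 0 the Python A still returns a value (0 for k = 0, max(stones) for k < 0, an accident of the `blank == k` test),
-- while B's window computation raises ValueError there, so those inputs are excluded.
def Pre_solution (stones : List Int) (k : Int) : Prop := 1 ≤ k
instance (stones : List Int) (k : Int) : Decidable (Pre_solution stones k) := by
  unfold Pre_solution; infer_instance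

def pvWitness_solution : List Int × Int := ([2, 2, 4, 5, 3, 3, 1, 4], 3)

def Spec_solution (stones : List Int) (k : Int) (out : Int) : Prop := out = solution_alt stones k
instance (stones : List Int) (k : Int) (out : Int) : Decidable (Spec_solution stones k out) := by
  unfold Spec_solution; infer_instance

-- ===== CLAIM (what is proved, stated in full; the proofs are below) =====
def Claim_equal_solution : Prop := ∀ (stones : List Int) (k : Int), Dom_solution stones k →
  Pre_solution stones k → Spec_solution stones k (solution stones k)

-- ===== LEMMAS AND PROOFS =====

-- the k-window of stones starting at position i
def pvWin (stones : List Int) (kn i : Nat) : List Int := (stones.drop i).take kn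

theorem pvWin_cons_succ (x : Int) (rest : List Int) (kn j : Nat) :
    pvWin (x :: rest) kn (j + 1) = pvWin rest kn j := by
  unfold pvWin; simp

-- characterization of can_cross's run counter: with `r = k - blank` credits left, the loop returns true
-- iff the first r elements do not all lie below num and no full k-window lies entirely below num
theorem ccAux_char (num : Int) (kn : Nat) (hk : 1 ≤ kn) :
    ∀ (l : List Int) (r : Nat), 1 ≤ r → r ≤ kn →
      (canCrossAux num (kn : Int) l ((kn : Int) - (r : Int)) = true ↔
        (¬ (r ≤ l.length ∧ ∀ x ∈ l.take r, x < num) ∧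
         ∀ i : Nat, i + kn ≤ l.length → ∃ x ∈ pvWin l kn i, num ≤ x)) := by
  intro l
  induction l with
  | nil =>
    intro r hr1 _
    simp only [canCrossAux, List.length_nil, List.take_nil]
    constructor
    · intro _
      exact ⟨fun h => by omega, fun i hi => by omega⟩
    · intro _; trivial
  | cons x rest ih =>
    intro r hr1 hrk
    obtain ⟨r', rfl⟩ : ∃ r', r = r' + 1 := ⟨r - 1, by omega⟩
    have htake : (x :: rest).take (r' + 1) = x :: rest.take r' := List.take_succ_cons
    by_cases hx : x < num
    · by_cases hr' : r' = 0
      · subst hr'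
        have hcond : (kn : Int) - ((0 + 1 : Nat) : Int) + 1 = (kn : Int) := by push_cast; ring
        have hLHS : canCrossAux num (kn : Int) (x :: rest) ((kn : Int) - ((0 + 1 : Nat) : Int)) = false := by
          simp only [canCrossAux, if_pos hx, hcond]
          simp
        rw [hLHS]
        simp only [Bool.false_eq_true, false_iff]
        intro hcc
        apply hcc.1
        refine ⟨by simp, ?_⟩
        intro y hy
        simp only [List.take_succ_cons, List.take_zero, List.mem_singleton] at hy
        rw [hy]; exact hx
      · -- r' ≥ 1 : one step, credits shrink to r'
        have hstep : canCrossAux num (kn : Int) (x :: rest) ((kn : Int) - ((r' + 1 : Nat) : Int))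
            = canCrossAux num (kn : Int) rest ((kn : Int) - (r' : Int)) := by
          have h1 : (kn : Int) - ((r' + 1 : Nat) : Int) + 1 = (kn : Int) - (r' : Int) := by
            push_cast; ring
          have h2 : (kn : Int) - (r' : Int) ≠ (kn : Int) := by
            have : 1 ≤ r' := by omega
            omega
          simp only [canCrossAux, if_pos hx, h1, if_neg h2]
        rw [hstep, ih r' (by omega) (by omega)]
        constructor
        · rintro ⟨hnp, hw⟩
          constructor
          · rintro ⟨hlen, hall⟩
            apply hnp
            refine ⟨by simp at hlen; omega, ?_⟩
            intro y hy
            exact hall y (by rw [htake]; exact List.mem_cons_of_mem x hy)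
          · intro i hi
            match i with
            | 0 =>
              by_contra hcon
              push Not at hcon
              apply hnp
              have hlen : kn ≤ rest.length + 1 := by simpa using hi
              refine ⟨by omega, ?_⟩
              intro y hy
              have hy2 : y ∈ rest.take (kn - 1) := by
                have heq : rest.take r' = (rest.take (kn - 1)).take r' := by
                  rw [List.take_take]
                  congr 1
                  omega
                exact List.take_subset _ _ (heq ▸ hy)
              have hmem : y ∈ pvWin (x :: rest) kn 0 := by
                unfold pvWin
                simp only [List.drop_zero]
                obtain ⟨kn', rfl⟩ : ∃ kn', kn = kn' + 1 := ⟨kn - 1, by omega⟩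
                simp only [List.take_succ_cons, List.mem_cons]
                right
                simpa using hy2
              have := hcon y hmem
              omega
            | Nat.succ j =>
              rw [pvWin_cons_succ]
              exact hw j (by simp only [List.length_cons] at hi; omega)
        · rintro ⟨hnp, hw⟩
          constructor
          · rintro ⟨hlen, hall⟩
            apply hnp
            refine ⟨by simp; omega, ?_⟩
            intro y hy
            rw [htake] at hy
            rcases List.mem_cons.mp hy with rfl | hy2
            · exact hx
            · exact hall y hy2
          · intro i hi
            rw [← pvWin_cons_succ x]
            exact hw (i + 1) (by simp only [List.length_cons]; omega)
    · -- x ≥ num : blank resets to 0, credits back to kn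
      have hnum : num ≤ x := not_lt.mp hx
      have hstep : canCrossAux num (kn : Int) (x :: rest) ((kn : Int) - ((r' + 1 : Nat) : Int))
          = canCrossAux num (kn : Int) rest ((kn : Int) - (kn : Int)) := by
        have h2 : (0 : Int) ≠ (kn : Int) := by omega
        simp only [canCrossAux, if_neg hx, if_neg h2]
        norm_num
      rw [hstep, ih kn hk le_rfl]
      constructor
      · rintro ⟨hnp, hw⟩
        constructor
        · rintro ⟨hlen, hall⟩
          have hxm : x ∈ (x :: rest).take (r' + 1) := by
            rw [htake]; exact List.mem_cons_self
          have := hall x hxm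
          omega
        · intro i hi
          match i with
          | 0 =>
            refine ⟨x, ?_, hnum⟩
            unfold pvWin
            simp only [List.drop_zero]
            obtain ⟨kn', rfl⟩ : ∃ kn', kn = kn' + 1 := ⟨kn - 1, by omega⟩
            simp [List.take_succ_cons]
          | Nat.succ j =>
            rw [pvWin_cons_succ]
            exact hw j (by simp only [List.length_cons] at hi; omega)
      · rintro ⟨hnp, hw⟩
        constructor
        · rintro ⟨hlen, hall⟩
          obtain ⟨z, hz, hznum⟩ := hw 1 (by simp only [List.length_cons]; omega)
          have : z ∈ rest.take kn := by
            rw [pvWin_cons_succ] at hz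
            unfold pvWin at hz
            simpa using hz
          have := hall z this
          omega
        · intro i hi
          rw [← pvWin_cons_succ x]
          exact hw (i + 1) (by simp only [List.length_cons]; omega)

-- top-level form: can_cross holds iff every full k-window contains a stone ≥ num
theorem can_cross_iff (stones : List Int) (num k : Int) (hk : 1 ≤ k) :
    (can_cross stones num k = true ↔
      ∀ i : Nat, i + k.toNat ≤ stones.length → ∃ x ∈ pvWin stones k.toNat i, num ≤ x) := by
  have hkn : 1 ≤ k.toNat := by omega
  have hcast : ((k.toNat : Int)) = k := Int.toNat_of_nonneg (by omega)
  have h := ccAux_char num k.toNat hkn stones k.toNat hkn le_rfl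
  rw [hcast] at h
  have hkk : k - k = (0 : Int) := by ring
  rw [hkk] at h
  unfold can_cross
  rw [h]
  constructor
  · exact fun h => h.2
  · intro h
    refine ⟨?_, h⟩
    rintro ⟨hlen, hall⟩
    obtain ⟨z, hz, hznum⟩ := h 0 (by omega)
    have : z ∈ stones.take k.toNat := by unfold pvWin at hz; simpa using hz
    have := hall z this
    omega

-- binary-search loop correctness: if can_cross holds exactly on indices ≤ m and ss[m] = M, the loop returns M
theorem bsLoop_eq (ss stones : List Int) (k M : Int) (m : Nat) (hm : m < ss.length)
    (hssM : ss[m] = M)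
    (hP : ∀ (i : Nat) (hi : i < ss.length), (can_cross stones ss[i] k = true ↔ i ≤ m)) :
    ∀ (lt rt answer : Int), 0 ≤ lt → rt ≤ (ss.length : Int) - 1 →
      lt ≤ (m : Int) + 1 → (lt = (m : Int) + 1 → answer = M) →
      (lt ≤ (m : Int) → (m : Int) ≤ rt) →
      bsLoop ss stones k lt rt answer = M := by
  have key : ∀ (fuel : Nat) (lt rt answer : Int), (rt + 1 - lt).toNat ≤ fuel →
      0 ≤ lt → rt ≤ (ss.length : Int) - 1 →
      lt ≤ (m : Int) + 1 → (lt = (m : Int) + 1 → answer = M) →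
      (lt ≤ (m : Int) → (m : Int) ≤ rt) →
      bsLoop ss stones k lt rt answer = M := by
    intro fuel
    induction fuel with
    | zero =>
      intro lt rt answer hf h0 hrt hltm hans hmr
      rw [bsLoop, dif_neg (by omega : ¬ lt ≤ rt)]
      apply hans
      omega
    | succ fuel ih =>
      intro lt rt answer hf h0 hrt hltm hans hmr
      rw [bsLoop]
      by_cases hle : lt ≤ rt
      · rw [dif_pos hle]
        obtain ⟨hm1, hm2⟩ := pvMidBounds lt rt hle
        set mid := PySem.Int.floordiv (lt + rt) 2 with hmiddef
        have h0m : 0 ≤ mid := by omega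
        have hmidlen : mid < (ss.length : Int) := by omega
        have hidx : mid.toNat < ss.length := by omega
        have hget : PySem.List.pyGet? ss mid = some ss[mid.toNat] :=
          PySem.List.pyGet?_eq_some_getElem ss h0m hmidlen
        simp only [hget, Option.getD_some]
        by_cases hcc : can_cross stones ss[mid.toNat] k = true
        · rw [if_pos hcc]
          have hmm : mid.toNat ≤ m := (hP mid.toNat hidx).mp hcc
          refine ih (mid + 1) rt (ss[mid.toNat]) (by omega) (by omega) hrt (by omega) ?_ (by omega)
          intro hEq
          have : mid.toNat = m := by omega
          rw [← hssM]
          congr 1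
        · rw [if_neg hcc]
          have hmm : m < mid.toNat := by
            by_contra hcon
            exact hcc ((hP mid.toNat hidx).mpr (by omega))
          exact ih lt (mid - 1) answer (by omega) h0 (by omega) hltm hans (by omega)
      · rw [dif_neg hle]
        apply hans
        omega
  intro lt rt answer
  exact key (rt + 1 - lt).toNat lt rt answer le_rfl

-- B's value is a member of stones and is exactly the threshold below which can_cross holds
theorem alt_props (stones : List Int) (k : Int) (hk : 1 ≤ k) (hne : stones ≠ []) :
    solution_alt stones k ∈ stones ∧
    ∀ v ∈ stones, (can_cross stones v k = true ↔ v ≤ solution_alt stones k) := by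
  have hcast : ((k.toNat : Int)) = k := Int.toNat_of_nonneg (by omega)
  unfold solution_alt
  by_cases hbig : k > (stones.length : Int)
  · rw [if_pos hbig]
    obtain ⟨M0, hM0⟩ : ∃ m, PySem.List.max? stones (fun x => x) = some m := by
      cases hmm : PySem.List.max? stones (fun x => x) with
      | none => exact absurd ((PySem.List.max?_eq_none_iff _ _).mp hmm) hne
      | some m => exact ⟨m, rfl⟩
    rw [hM0]
    simp only [Option.getD_some]
    refine ⟨PySem.List.max?_mem hM0, ?_⟩
    intro v hv
    have hvle : v ≤ M0 := PySem.List.max?_isMax hM0 v hv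
    have hcc : can_cross stones v k = true := by
      rw [can_cross_iff stones v k hk]
      intro i hi
      exfalso
      omega
    simp [hcc, hvle]
  · rw [if_neg hbig]
    have hwinfact : ∀ i : Int, 0 ≤ i → i < (stones.length : Int) - k + 1 →
        ∃ w, (PySem.List.max? (PySem.List.slice stones (some i) (some (i + k))) (fun x => x)).getD 0 = w ∧
             w ∈ pvWin stones k.toNat i.toNat ∧ ∀ x ∈ pvWin stones k.toNat i.toNat, x ≤ w := by
      intro i h0 hilt
      have hslice : PySem.List.slice stones (some i) (some (i + k)) = pvWin stones k.toNat i.toNat := by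
        rw [PySem.List.slice_toNat stones h0 (by omega)]
        unfold pvWin
        congr 1
        omega
      rw [hslice]
      have hwne : pvWin stones k.toNat i.toNat ≠ [] := by
        apply List.ne_nil_of_length_pos
        unfold pvWin
        rw [List.length_take, List.length_drop]
        omega
      obtain ⟨w, hw⟩ : ∃ w, PySem.List.max? (pvWin stones k.toNat i.toNat) (fun x => x) = some w := by
        cases hmm : PySem.List.max? (pvWin stones k.toNat i.toNat) (fun x => x) with
        | none => exact absurd ((PySem.List.max?_eq_none_iff _ _).mp hmm) hwne
        | some w => exact ⟨w, rfl⟩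
      exact ⟨w, by rw [hw]; rfl, PySem.List.max?_mem hw,
        fun x hx => PySem.List.max?_isMax hw x hx⟩
    set f : Int → Int :=
      fun i => (PySem.List.max? (PySem.List.slice stones (some i) (some (i + k))) (fun x => x)).getD 0
      with hf
    set L := (PySem.List.pyRange 0 ((stones.length : Int) - k + 1) 1).map f with hL
    have hLne : L ≠ [] := by
      apply List.ne_nil_of_length_pos
      rw [hL, List.length_map, PySem.List.length_pyRange_one]
      omega
    obtain ⟨M0, hM0⟩ : ∃ m, PySem.List.min? L (fun x => x) = some m := by
      cases hmm : PySem.List.min? L (fun x => x) with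
      | none => exact absurd ((PySem.List.min?_eq_none_iff _ _).mp hmm) hLne
      | some m => exact ⟨m, rfl⟩
    rw [hM0]
    simp only [Option.getD_some]
    have hM0min : ∀ y ∈ L, M0 ≤ y := fun y hy => PySem.List.min?_isMin hM0 y hy
    obtain ⟨i0, hi0mem, hfi0⟩ := List.mem_map.mp (PySem.List.min?_mem hM0)
    obtain ⟨hi0l, hi0r⟩ := PySem.List.mem_pyRange_one.mp hi0mem
    obtain ⟨w0, hfw0, hw0mem, hw0max⟩ := hwinfact i0 hi0l (by omega)
    have hw0M : w0 = M0 := by rw [← hfi0, ← hfw0]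
    have hwin_sub : ∀ (j : Nat) (x : Int), x ∈ pvWin stones k.toNat j → x ∈ stones := by
      intro j x hx
      unfold pvWin at hx
      exact List.mem_of_mem_drop (List.mem_of_mem_take hx)
    constructor
    · exact hwin_sub i0.toNat M0 (hw0M ▸ hw0mem)
    · intro v hv
      rw [can_cross_iff stones v k hk]
      constructor
      · intro h
        have hi0n : i0.toNat + k.toNat ≤ stones.length := by omega
        obtain ⟨x, hx, hvx⟩ := h i0.toNat hi0n
        have := hw0max x hx
        omega
      · intro hvM i hi
        have h0j : (0 : Int) ≤ (i : Int) := by omega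
        have hjlt : (i : Int) < (stones.length : Int) - k + 1 := by omega
        obtain ⟨w, hfw, hwmem, _⟩ := hwinfact (i : Int) h0j hjlt
        have hfL : f (i : Int) ∈ L := by
          rw [hL]
          exact List.mem_map_of_mem (PySem.List.mem_pyRange_one.mpr ⟨h0j, hjlt⟩)
        have hM0w : M0 ≤ w := by
          rw [← hfw]
          exact hM0min _ hfL
        have hwmem' : w ∈ pvWin stones k.toNat i := by
          simpa using hwmem
        exact ⟨w, hwmem', by omega⟩

-- ===== VERDICT (by name: the statement is the Claim_ definition above) =====
theorem solution_spec : Claim_equal_solution := by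
  unfold Claim_equal_solution
  intro stones k _ hk
  unfold Spec_solution
  have hk1 : (1 : Int) ≤ k := hk
  by_cases hne : stones = []
  · subst hne
    have hss : PySem.List.sorted (PySem.Set.ofList ([] : List Int)) (fun x => x) false = [] := by
      rfl
    unfold solution
    rw [hss]
    rw [bsLoop, dif_neg (by norm_num : ¬ (0 : Int) ≤ (([] : List Int).length : Int) - 1)]
    unfold solution_alt
    rw [if_pos (by simp; omega)]
    rfl
  · obtain ⟨hMmem, hMcc⟩ := alt_props stones k hk1 hne
    set M := solution_alt stones k with hMdef
    set ss := PySem.List.sorted (PySem.Set.ofList stones) (fun x => x) false with hssdef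
    have hss_lt : ss.Pairwise (· < ·) := PySem.List.sorted_ofList_pairwise_lt stones
    have hmemss : ∀ x : Int, x ∈ ss ↔ x ∈ stones := by
      intro x
      rw [hssdef, PySem.List.mem_sorted, PySem.Set.mem_ofList]
    obtain ⟨m, hm, hssM⟩ := List.mem_iff_getElem.mp ((hmemss M).mpr hMmem)
    have hP : ∀ (i : Nat) (hi : i < ss.length), (can_cross stones ss[i] k = true ↔ i ≤ m) := by
      intro i hi
      have helem : ss[i] ∈ stones := (hmemss _).mp (List.getElem_mem hi)
      rw [hMcc _ helem]
      constructor
      · intro hle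
        by_contra hcon
        have : ss[m] < ss[i] := List.pairwise_iff_getElem.mp hss_lt m i hm hi (by omega)
        omega
      · intro hle
        rcases Nat.lt_or_ge i m with hlt | hge
        · have : ss[i] < ss[m] := List.pairwise_iff_getElem.mp hss_lt i m hi hm hlt
          omega
        · have : i = m := by omega
          subst this
          omega
    have := bsLoop_eq ss stones k M m hm hssM hP 0 ((ss.length : Int) - 1) 0
      (le_refl 0) (le_refl _) (by omega) (by omega) (by omega)
    exact this
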